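-- pv_equiv track=rewrite | github.com/Twhart28/Blood_Pressure_Varibility | PyArrowTest_og.py | sniff_delimiter
-- ===== SOURCE A (Python) =====
-- def sniff_delimiter(sample_text: str) -> str:
--     """Very small heuristic delimiter sniffer."""
--     candidates = ["\t", ",", ";", "|", " "]
--     best = "\t"
--     best_hits = -1
--     for d in candidates:
--         hits = 0
--         for line in sample_text.splitlines()[:30]:
--             if d in line:
--                 hits += 1
--         if hits > best_hits:
--             best_hits = hits
--             best = d
--     return best
-- ===== SOURCE B (Python) =====
-- def sniff_delimiter(sample_text: str) -> str:
--     """Recursive tournament: best delimiter of the tail vs the head, ties going to the earlier candidate."""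
--     lines = sample_text.splitlines()[:30]
--
--     def pick(cands):
--         d = cands[0]
--         c = sum(1 for line in lines if d in line)
--         if len(cands) == 1:
--             return d, c
--         rd, rc = pick(cands[1:])
--         return (d, c) if c >= rc else (rd, rc)
--
--     return pick(["\t", ",", ";", "|", " "])[0]
-- ===== Notes on version B (the rewrite author's own statement) =====
-- stated objective: alternative
-- what changed: B replaces A's iterative best/best_hits accumulator (strict > with a -1 seed, scanning candidates left to right) by a recursive tournament over the candidate tail: each call counts the head's hits and compares it with >= against the recursively chosen best of the rest, so ties go to the earlier candidate structurally and no sentinel seed exists.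
import Mathlib
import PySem

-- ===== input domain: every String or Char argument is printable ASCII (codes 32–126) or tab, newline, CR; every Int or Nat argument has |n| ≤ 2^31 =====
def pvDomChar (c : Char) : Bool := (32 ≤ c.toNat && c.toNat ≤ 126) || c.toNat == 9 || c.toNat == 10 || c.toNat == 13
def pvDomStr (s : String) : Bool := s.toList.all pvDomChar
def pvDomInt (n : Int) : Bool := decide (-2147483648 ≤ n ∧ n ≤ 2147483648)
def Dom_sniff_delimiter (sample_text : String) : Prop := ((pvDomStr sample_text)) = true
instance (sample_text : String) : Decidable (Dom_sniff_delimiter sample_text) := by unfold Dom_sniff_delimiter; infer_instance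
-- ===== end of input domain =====

-- B replaces A's iterative best/best_hits scan (strict >, seed -1) by a recursive tournament
-- over the candidate tail with >= (ties to the earlier candidate): same value, different decomposition.


-- ===== PORT A =====
def sniff_delimiter (sample_text : String) : String :=
  let candidates : List String := ["\t", ",", ";", "|", " "]
  (candidates.foldl (fun (st : String × Int) d =>
      let hits : Int :=
        (PySem.List.slice (PySem.Str.splitlines sample_text) none (some 30)).foldl
          (fun h line => if PySem.Str.isIn d line then h + 1 else h) 0
      if hits > st.2 then (d, hits) else st)
    ("\t", -1)).1

-- ===== PORT B =====
-- pick(cands): head's count vs recursive best of the tail, >= keeps the earlier candidate.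
-- The [] case is unreachable (Python's pick indexes cands[0] and is only called on non-empty lists).
def sniff_pick (lines : List String) : List String → String × Int
  | [] => ("", 0)
  | d :: rest =>
    let c : Int := lines.foldl (fun h line => if PySem.Str.isIn d line then h + 1 else h) 0
    match rest with
    | [] => (d, c)
    | _ :: _ =>
      let r := sniff_pick lines rest
      if c ≥ r.2 then (d, c) else r

def sniff_delimiter_alt (sample_text : String) : String :=
  let lines := PySem.List.slice (PySem.Str.splitlines sample_text) none (some 30)
  (sniff_pick lines ["\t", ",", ";", "|", " "]).1

-- ===== PRECONDITION & SPEC =====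
def Spec_sniff_delimiter (sample_text : String) (out : String) : Prop := out = sniff_delimiter_alt sample_text
instance (sample_text : String) (out : String) : Decidable (Spec_sniff_delimiter sample_text out) := by unfold Spec_sniff_delimiter; infer_instance

-- ===== CLAIM (what is proved, stated in full; the proofs are below) =====
def Claim_equal_sniff_delimiter : Prop := ∀ (sample_text : String), Dom_sniff_delimiter sample_text → Spec_sniff_delimiter sample_text (sniff_delimiter sample_text)

-- ===== LEMMAS AND PROOFS =====

lemma count_nonneg (L : List String) (d : String) :
    (0 : Int) ≤ L.foldl (fun h line => if PySem.Str.isIn d line then h + 1 else h) 0 := by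
  rw [PySem.List.foldl_if_add_one]
  positivity

set_option maxHeartbeats 1000000 in
lemma pick_eq (L : List String) :
    ((["\t", ",", ";", "|", " "] : List String).foldl (fun (st : String × Int) d =>
        let hits : Int := L.foldl (fun h line => if PySem.Str.isIn d line then h + 1 else h) 0
        if hits > st.2 then (d, hits) else st) ("\t", -1)).1
      = (sniff_pick L ["\t", ",", ";", "|", " "]).1 := by
  simp only [List.foldl, sniff_pick]
  generalize hg0 : (L.foldl (fun h line => if PySem.Str.isIn "\t" line then h + 1 else h) (0 : Int)) = h0
  generalize hg1 : (L.foldl (fun h line => if PySem.Str.isIn "," line then h + 1 else h) (0 : Int)) = h1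
  generalize hg2 : (L.foldl (fun h line => if PySem.Str.isIn ";" line then h + 1 else h) (0 : Int)) = h2
  generalize hg3 : (L.foldl (fun h line => if PySem.Str.isIn "|" line then h + 1 else h) (0 : Int)) = h3
  generalize hg4 : (L.foldl (fun h line => if PySem.Str.isIn " " line then h + 1 else h) (0 : Int)) = h4
  have n0 : (0 : Int) ≤ h0 := hg0 ▸ count_nonneg L "\t"
  split_ifs <;> first | rfl | omega

-- ===== VERDICT (by name: the statement is the Claim_ definition above) =====
theorem sniff_delimiter_spec : Claim_equal_sniff_delimiter := by
  intro sample_text _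
  unfold Spec_sniff_delimiter sniff_delimiter sniff_delimiter_alt
  exact pick_eq (PySem.List.slice (PySem.Str.splitlines sample_text) none (some 30))
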